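-- pv_equiv track=rewrite | github.com/juicer149/curate | src/curate/blocks.py | _indent_width
-- ===== SOURCE A (Python) =====
-- def _indent_width(s: str) -> int:
--     """
--     Compute indentation width in a stable way.
--
--     v0.1 policy:
--     - tabs are counted as 4 spaces (simple, deterministic)
--     - indentation is computed from leading whitespace only
--     """
--     width = 0
--     for ch in s:
--         if ch == " ":
--             width += 1
--         elif ch == "\t":
--             width += 4
--         else:
--             break
--     return width
-- ===== SOURCE B (Python) =====
-- def _indent_width(s: str) -> int:
--     prefix = s[: len(s) - len(s.lstrip(" \t"))]
--     return prefix.count(" ") + 4 * prefix.count("\t")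
-- ===== Notes on version B (the rewrite author's own statement) =====
-- stated objective: simpler
-- what changed: Replaces the explicit accumulate-and-break loop by extracting the indentation prefix with lstrip(' \t') and a slice, then computing the width as prefix.count(' ') + 4*prefix.count('\t') with no hand-written loop.
import Mathlib
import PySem

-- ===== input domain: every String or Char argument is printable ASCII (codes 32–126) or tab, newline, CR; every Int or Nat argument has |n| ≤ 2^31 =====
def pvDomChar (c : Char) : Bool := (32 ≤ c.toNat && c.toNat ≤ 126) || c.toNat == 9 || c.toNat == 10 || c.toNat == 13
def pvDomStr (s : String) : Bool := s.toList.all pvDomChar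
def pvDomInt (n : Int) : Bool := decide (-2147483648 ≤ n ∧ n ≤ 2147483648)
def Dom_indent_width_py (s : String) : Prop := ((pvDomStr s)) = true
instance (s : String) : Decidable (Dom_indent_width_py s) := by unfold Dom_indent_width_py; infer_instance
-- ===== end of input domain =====

-- B replaces A's accumulate-and-break loop by slicing off the lstrip(' \t') indentation
-- prefix and summing two substring counts; same O(n) cost, no explicit loop (objective: simpler).

-- ===== PORT A =====
-- the 'for ch in s: … break' loop with its running width
def indentGo : List Char → Int → Int
  | [], width => width
  | ch :: rest, width =>
    if ch == ' ' then indentGo rest (width + 1)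
    else if ch == '\t' then indentGo rest (width + 4)
    else width

def indent_width_py (s : String) : Int := indentGo s.toList 0

-- ===== PORT B =====
-- s.lstrip(" \t"): drop leading chars belonging to the set {' ', '\t'} (ported by hand,
-- exact: Python lstrip with an explicit char set drops exactly those leading code points)
def lstripSpTab (cs : List Char) : List Char := cs.dropWhile (fun c => c == ' ' || c == '\t')

def indent_width_py_alt (s : String) : Int :=
  let pfx := PySem.Str.slice s none (some (PySem.Str.len s - ((lstripSpTab s.toList).length : Int)))
  (PySem.Str.count pfx " " : Int) + 4 * (PySem.Str.count pfx "\t" : Int)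

-- ===== PRECONDITION & SPEC =====
def Spec_indent_width_py (s : String) (out : Int) : Prop := out = indent_width_py_alt s
instance (s : String) (out : Int) : Decidable (Spec_indent_width_py s out) := by unfold Spec_indent_width_py; infer_instance

-- ===== CLAIM (what is proved, stated in full; the proofs are below) =====
def Claim_equal_indent_width_py : Prop := ∀ (s : String), Dom_indent_width_py s → Spec_indent_width_py s (indent_width_py s)

-- ===== LEMMAS AND PROOFS =====

-- single-character substring count is character count
lemma countgo_single (c : Char) : ∀ (cs : List Char) (acc : Nat),
    PySem.Chars.count.go [c] cs.length cs acc = acc + cs.count c := by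
  intro cs
  induction cs with
  | nil => intro acc; simp [PySem.Chars.count.go]
  | cons h t ih =>
    intro acc
    by_cases hc : c = h
    · subst hc
      simp [PySem.Chars.count.go, List.isPrefixOf, ih]
      omega
    · have hc' : h ≠ c := fun e => hc e.symm
      simp [PySem.Chars.count.go, List.isPrefixOf, hc, hc', ih]

lemma count_single (cs : List Char) (c : Char) :
    PySem.Chars.count cs [c] = cs.count c := by
  simp [PySem.Chars.count]
  simpa using countgo_single c cs 0

-- A's loop computes the two character counts over the [ \t]-takeWhile prefix
lemma indentGo_eq (cs : List Char) : ∀ (w : Int),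
    indentGo cs w =
      w + ((cs.takeWhile (fun c => c == ' ' || c == '\t')).count ' ' : Int)
        + 4 * ((cs.takeWhile (fun c => c == ' ' || c == '\t')).count '\t' : Int) := by
  induction cs with
  | nil => intro w; simp [indentGo]
  | cons h t ih =>
    intro w
    by_cases hs : h == ' '
    · have hval : h = ' ' := by simpa using hs
      simp [indentGo, hval, ih]
      ring
    · by_cases ht : h == '\t'
      · have hval : h = '\t' := by simpa using ht
        simp [indentGo, hval, ih]
        ring
      ·         simp [indentGo, hs, ht]

lemma b_prefix (s : String) :
    (PySem.Str.slice s none (some (PySem.Str.len s - ((lstripSpTab s.toList).length : Int)))).toList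
      = s.toList.takeWhile (fun c => c == ' ' || c == '\t') := by
  have happ := List.takeWhile_append_dropWhile
    (p := fun c => c == ' ' || c == '\t') (l := s.toList)
  have hsplit := congrArg List.length happ
  rw [List.length_append] at hsplit
  have hb : PySem.Str.len s - ((lstripSpTab s.toList).length : Int)
      = ((s.toList.takeWhile (fun c => c == ' ' || c == '\t')).length : Int) := by
    rw [PySem.Str.len_eq]
    simp only [lstripSpTab]
    omega
  rw [hb, PySem.Str.toList_slice, PySem.Chars.slice_eq_listSlice,
    PySem.List.slice_to_natCast]
  exact (List.prefix_iff_eq_take.mp (List.takeWhile_prefix _)).symm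

-- ===== VERDICT (by name: the statement is the Claim_ definition above) =====
theorem indent_width_py_spec : Claim_equal_indent_width_py := by
  intro s _
  unfold Spec_indent_width_py indent_width_py indent_width_py_alt
  rw [indentGo_eq]
  simp only [PySem.Str.count_eq, b_prefix]
  have h1 : (" " : String).toList = [' '] := rfl
  have h2 : ("\t" : String).toList = ['\t'] := rfl
  rw [h1, h2, count_single, count_single]
  ring
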